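-- pv_equiv track=rewrite | github.com/Hogaeng/Algorithm | p_42577_phonnum/phonnum.py | solution
-- ===== SOURCE A (Python) =====
-- def solution(phone_book):
--     """
--     answer = True
--     for s in phone_book:
--         tmp=""
--         for letter in s:
--             tmp+=letter
--             if tmp in phone_book:
--                 if tmp != s:
--                     answer=False
--     return answer
--     """
--     answer = True
--     di={}
--     for s in phone_book:
--         di[s]=1
--     for s in phone_book:
--         tmp=""
--         for letter in s:
--             tmp+=letter
--             if tmp in di:
--                 if tmp != s:
--                     answer=False
--     return answer
-- ===== SOURCE B (Python) =====
-- def solution(phone_book):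
--     root = {}
--     for number in phone_book:
--         node = root
--         for ch in number:
--             node = node.setdefault(ch, {})
--         node["end"] = True
--     for number in phone_book:
--         node = root
--         for ch in number[:-1]:
--             node = node[ch]
--             if "end" in node:
--                 return False
--     return True
-- ===== Notes on version B (the rewrite author's own statement) =====
-- stated objective: alternative
-- what changed: Replaces A's dict-of-all-strings plus per-string prefix-building membership scan by a trie: insert every number, then walk each number's characters except the last and fail as soon as a terminal node (a complete shorter number) is passed.
import Mathlib
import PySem

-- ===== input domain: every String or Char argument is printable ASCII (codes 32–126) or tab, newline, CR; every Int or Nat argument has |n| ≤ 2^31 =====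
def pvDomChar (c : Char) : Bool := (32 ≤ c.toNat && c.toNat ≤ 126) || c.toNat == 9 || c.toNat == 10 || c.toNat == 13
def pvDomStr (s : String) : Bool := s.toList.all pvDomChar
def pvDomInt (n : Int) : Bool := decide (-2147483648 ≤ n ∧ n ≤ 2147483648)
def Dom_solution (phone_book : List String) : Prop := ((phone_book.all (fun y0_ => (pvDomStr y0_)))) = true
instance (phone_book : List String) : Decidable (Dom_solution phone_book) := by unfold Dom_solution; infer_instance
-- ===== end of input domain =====

-- B replaces A's dict-of-all-strings plus per-string prefix-building scan by a trie walk.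

-- ===== PORT A =====
-- tmp (a string built by concatenation) is carried as a List Char; comparisons/lookups go through String.ofList (exact)
def solution (phone_book : List String) : Bool :=
  let di : PySem.Dict String Int :=
    phone_book.foldl (fun d s => d.insert s 1) PySem.Dict.empty
  phone_book.foldl (fun answer s =>
    (s.toList.foldl (fun (st : Bool × List Char) letter =>
        let tmp := st.2 ++ [letter]
        (if di.contains (String.ofList tmp) = true then
           (if String.ofList tmp ≠ s then false else st.1)
         else st.1, tmp))
      (answer, ([] : List Char))).1) true

-- ===== PORT B =====
-- the nested-dict trie of Source B, hand-ported (nested dicts are not a PySem type): a node is its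
-- "end" flag plus an insertion-ordered child list; setdefault = lookup-or-create, exact.
mutual
inductive PvTrie where
  | mk : Bool → PvKids → PvTrie
inductive PvKids where
  | nil : PvKids
  | cons : Char → PvTrie → PvKids → PvKids
end

def pvKidsFind : PvKids → Char → Option PvTrie
  | .nil, _ => none
  | .cons c t ks, c' => if c' = c then some t else pvKidsFind ks c'

def pvKidsSet : PvKids → Char → PvTrie → PvKids
  | .nil, c, t => .cons c t .nil
  | .cons c0 t0 ks, c, t => if c = c0 then .cons c0 t ks else .cons c0 t0 (pvKidsSet ks c t)

-- first loop body: node.setdefault(ch, {}) down the word, then node["end"] = True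
def pvInsert : PvTrie → List Char → PvTrie
  | .mk _ ks, [] => .mk true ks
  | .mk e ks, c :: cs =>
      let child := (pvKidsFind ks c).getD (.mk false .nil)
      .mk e (pvKidsSet ks c (pvInsert child cs))

-- second loop body: node = node[ch]; if "end" in node: conflict.  The 'none' branch is
-- unreachable in solution_alt (every prefix path of an inserted word exists in the trie),
-- matching that node[ch] never raises in Source B.
def pvWalk : PvTrie → List Char → Bool
  | _, [] => false
  | .mk _ ks, c :: cs =>
      match pvKidsFind ks c with
      | some (.mk e ks') => if e then true else pvWalk (.mk e ks') cs
      | none => false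

def solution_alt (phone_book : List String) : Bool :=
  let root := phone_book.foldl (fun t n => pvInsert t n.toList) (.mk false .nil)
  -- number[:-1] is dropLast (exact); 'for …: if …: return False / return True' is !any
  !(phone_book.any (fun n => pvWalk root n.toList.dropLast))

-- ===== PRECONDITION & SPEC =====
def Spec_solution (phone_book : List String) (out : Bool) : Prop := out = solution_alt phone_book
instance (phone_book : List String) (out : Bool) : Decidable (Spec_solution phone_book out) := by
  unfold Spec_solution; infer_instance

-- ===== CLAIM (what is proved, stated in full; the proofs are below) =====
def Claim_equal_solution : Prop :=
  ∀ (phone_book : List String), Dom_solution phone_book →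
    Spec_solution phone_book (solution phone_book)

-- ===== LEMMAS AND PROOFS =====

-- "some string of the book is a proper, nonempty prefix of another" — the property both programs detect
def pvBad (pb : List String) : Prop :=
  ∃ s ∈ pb, ∃ t ∈ pb, t ≠ s ∧ t ≠ "" ∧ t.toList <+: s.toList

lemma pv_toList_ne_nil (t : String) : t.toList ≠ [] ↔ t ≠ "" := by
  constructor
  · intro h he; exact h (he ▸ rfl)
  · intro h hl
    apply h
    calc t = String.ofList t.toList := String.ofList_toList.symm
    _ = "" := by rw [hl]

-- membership in A's dict is membership in the book
lemma pv_di_contains (pb : List String) (k : String) :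
    (pb.foldl (fun d s => d.insert s (1 : Int)) PySem.Dict.empty).contains k
      = decide (k ∈ pb) := by
  rw [PySem.Dict.contains_eq_decide_mem_keys, PySem.Dict.keys_foldl_insert]
  simp only [PySem.Dict.keys_empty, PySem.Set.update_nil_left]
  simp [PySem.Set.mem_ofList]

-- the successive values of tmp over cs, starting from accumulated prefix p
def pvPrefs (p : List Char) : List Char → List (List Char)
  | [] => []
  | c :: cs => (p ++ [c]) :: pvPrefs (p ++ [c]) cs

lemma pv_mem_prefs (cs : List Char) : ∀ (p t : List Char),
    t ∈ pvPrefs p cs ↔ ∃ u, u ≠ [] ∧ u <+: cs ∧ t = p ++ u := by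
  induction cs with
  | nil => intro p t; simp [pvPrefs]
  | cons c cs ih =>
    intro p t
    simp only [pvPrefs, List.mem_cons, ih]
    constructor
    · rintro (rfl | ⟨u, hu, hpre, rfl⟩)
      · exact ⟨[c], by simp, ⟨cs, rfl⟩, rfl⟩
      · refine ⟨c :: u, by simp, ?_, by simp⟩
        obtain ⟨d, hd⟩ := hpre
        exact ⟨d, by simp [hd]⟩
    · rintro ⟨u, hu, hpre, rfl⟩
      rcases u with _ | ⟨d, u'⟩
      · exact absurd rfl hu
      · rw [List.cons_prefix_cons] at hpre
        obtain ⟨rfl, hp2⟩ := hpre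
        by_cases h0 : u' = []
        · subst h0; left; rfl
        · right; exact ⟨u', h0, hp2, by simp⟩

-- A's inner loop: the flag survives iff no visited tmp is a hit
lemma pv_inner (di : PySem.Dict String Int) (s : String) (cs : List Char) :
    ∀ (p : List Char) (ans : Bool),
    (cs.foldl (fun (st : Bool × List Char) letter =>
        (if di.contains (String.ofList (st.2 ++ [letter])) = true then
           (if String.ofList (st.2 ++ [letter]) ≠ s then false else st.1)
         else st.1, st.2 ++ [letter])) (ans, p)).1
      = (ans && !(pvPrefs p cs).any
            (fun t => di.contains (String.ofList t) && decide (String.ofList t ≠ s))) := by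
  induction cs with
  | nil => intro p ans; simp [pvPrefs]
  | cons c cs ih =>
    intro p ans
    simp only [List.foldl_cons, pvPrefs, List.any_cons]
    rw [ih]
    by_cases h1 : di.contains (String.ofList (p ++ [c])) = true <;>
      by_cases h2 : String.ofList (p ++ [c]) ≠ s <;>
      cases ans <;> simp_all

lemma pv_foldl_and (g : String → Bool) (l : List String) : ∀ (ans : Bool),
    l.foldl (fun a s => a && g s) ans = (ans && l.all g) := by
  induction l with
  | nil => intro ans; simp
  | cons x l ih => intro ans; simp [List.foldl_cons, ih, Bool.and_assoc]

lemma pv_all_iff (pb : List String) :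
    (pb.all (fun s => !((pvPrefs [] s.toList).any
        (fun t => decide (String.ofList t ∈ pb) && decide (String.ofList t ≠ s)))) = true)
      ↔ ¬ pvBad pb := by
  simp only [List.all_eq_true, Bool.not_eq_true', List.any_eq_false, Bool.and_eq_true,
    decide_eq_true_eq, not_and, not_not, pvBad]
  constructor
  · rintro h ⟨s, hs, t, ht, hnets, hne0, hpre⟩
    have hmem : t.toList ∈ pvPrefs [] s.toList :=
      (pv_mem_prefs _ _ _).mpr ⟨t.toList, (pv_toList_ne_nil t).mpr hne0, hpre, rfl⟩
    have := h s hs t.toList hmem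
    rw [String.ofList_toList] at this
    exact hnets (this ht)
  · intro h s hs t htmem hmem
    obtain ⟨u, hu, hpre, heq⟩ := (pv_mem_prefs _ _ _).mp htmem
    rw [List.nil_append] at heq
    subst heq
    by_contra hne
    apply h
    refine ⟨s, hs, String.ofList t, hmem, hne, ?_, ?_⟩
    · rw [← pv_toList_ne_nil, String.toList_ofList]; exact hu
    · rw [String.toList_ofList]; exact hpre

-- characterization of A
lemma pv_A_char (pb : List String) : solution pb = false ↔ pvBad pb := by
  simp only [solution]
  rw [show (fun (answer : Bool) (s : String) =>
      (s.toList.foldl (fun (st : Bool × List Char) letter =>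
        (if (pb.foldl (fun d s => d.insert s (1 : Int)) PySem.Dict.empty).contains
              (String.ofList (st.2 ++ [letter])) = true then
           (if String.ofList (st.2 ++ [letter]) ≠ s then false else st.1)
         else st.1, st.2 ++ [letter])) (answer, ([] : List Char))).1)
    = (fun (answer : Bool) (s : String) =>
        answer && !(pvPrefs [] s.toList).any
          (fun t => decide (String.ofList t ∈ pb) && decide (String.ofList t ≠ s)))
    from funext fun answer => funext fun s => by
      rw [pv_inner]
      simp only [pv_di_contains]]
  rw [pv_foldl_and]
  simp only [Bool.true_and]
  rw [Bool.eq_false_iff]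
  rw [ne_eq, pv_all_iff]
  exact not_not

-- ===== trie semantics =====

-- the set of words whose terminal flag is set
def pvMem : PvTrie → List Char → Bool
  | .mk e _, [] => e
  | .mk _ ks, c :: cs =>
      match pvKidsFind ks c with
      | some t => pvMem t cs
      | none => false

lemma pv_kidsFind_set : ∀ (ks : PvKids) (c c' : Char) (t : PvTrie),
    pvKidsFind (pvKidsSet ks c t) c' = if c' = c then some t else pvKidsFind ks c'
  | .nil, c, c', t => by
    by_cases h : c' = c <;> simp [pvKidsSet, pvKidsFind, h]
  | .cons c0 t0 ks, c, c', t => by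
    by_cases h1 : c = c0
    · subst h1
      by_cases h2 : c' = c <;> simp [pvKidsSet, pvKidsFind, h2]
    · by_cases h2 : c' = c0
      · subst h2
        simp [pvKidsSet, pvKidsFind, h1, Ne.symm h1]
      · simp [pvKidsSet, pvKidsFind, h1, h2, pv_kidsFind_set ks c c' t]

lemma pv_mem_empty (u : List Char) : pvMem (.mk false .nil) u = false := by
  cases u <;> simp [pvMem, pvKidsFind]

lemma pv_mem_insert (w : List Char) : ∀ (t : PvTrie) (u : List Char),
    pvMem (pvInsert t w) u = true ↔ u = w ∨ pvMem t u = true := by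
  induction w with
  | nil =>
    rintro ⟨e, ks⟩ u
    cases u with
    | nil => simp [pvInsert, pvMem]
    | cons c cs => simp [pvInsert, pvMem]
  | cons c w ih =>
    rintro ⟨e, ks⟩ u
    cases u with
    | nil => simp [pvInsert, pvMem]
    | cons c' cs =>
      simp only [pvInsert, pvMem, pv_kidsFind_set]
      by_cases h : c' = c
      · subst h
        simp only [if_pos rfl]
        cases hf : pvKidsFind ks c' with
        | some t' => simpa using ih t' cs
        | none => simpa [pv_mem_empty] using ih (.mk false .nil) cs
      · simp only [if_neg h]
        have : ¬ (c' :: cs = c :: w) := by simp [h]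
        cases hf : pvKidsFind ks c' with
        | some t' => simp [this]
        | none => simp [this]

lemma pv_mem_fold (l : List String) : ∀ (t : PvTrie) (u : List Char),
    pvMem (l.foldl (fun t n => pvInsert t n.toList) t) u = true
      ↔ (∃ w ∈ l, u = w.toList) ∨ pvMem t u = true := by
  induction l with
  | nil => intro t u; simp
  | cons x l ih =>
    intro t u
    rw [List.foldl_cons, ih, pv_mem_insert]
    constructor
    · rintro (⟨w, hw, rfl⟩ | rfl | h)
      · exact Or.inl ⟨w, List.mem_cons_of_mem _ hw, rfl⟩
      · exact Or.inl ⟨x, List.mem_cons_self, rfl⟩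
      · exact Or.inr h
    · rintro (⟨w, hw, rfl⟩ | h)
      · rcases List.mem_cons.mp hw with rfl | hw'
        · exact Or.inr (Or.inl rfl)
        · exact Or.inl ⟨w, hw', rfl⟩
      · exact Or.inr (Or.inr h)

-- the walk fires iff some nonempty prefix of cs is a word of the trie
lemma pv_walk_iff (cs : List Char) : ∀ (t : PvTrie),
    pvWalk t cs = true ↔ ∃ p, p ≠ [] ∧ p <+: cs ∧ pvMem t p = true := by
  induction cs with
  | nil =>
    intro t
    simp only [pvWalk, Bool.false_eq_true, false_iff]
    rintro ⟨p, hp, hpre, _⟩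
    exact hp (List.prefix_nil.mp hpre)
  | cons c cs ih =>
    rintro ⟨e, ks⟩
    simp only [pvWalk]
    cases hf : pvKidsFind ks c with
    | none =>
      simp only [Bool.false_eq_true, false_iff]
      rintro ⟨p, hp, hpre, hm⟩
      rcases p with _ | ⟨d, p'⟩
      · exact hp rfl
      · rw [List.cons_prefix_cons] at hpre
        obtain ⟨rfl, _⟩ := hpre
        simp [pvMem, hf] at hm
    | some t' =>
      obtain ⟨e', ks'⟩ := t'
      by_cases he : e' = true
      · subst he
        exact iff_of_true (by simp) ⟨[c], by simp, ⟨cs, rfl⟩, by simp [pvMem, hf]⟩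
      · rw [Bool.not_eq_true] at he
        subst he
        simp only [Bool.false_eq_true, if_false, ih]
        constructor
        · rintro ⟨p, hp, hpre, hm⟩
          refine ⟨c :: p, by simp, ?_, by simp [pvMem, hf, hm]⟩
          obtain ⟨d, hd⟩ := hpre
          exact ⟨d, by simp [hd]⟩
        · rintro ⟨p, hp, hpre, hm⟩
          rcases p with _ | ⟨d, p'⟩
          · exact absurd rfl hp
          · rw [List.cons_prefix_cons] at hpre
            obtain ⟨rfl, hp2⟩ := hpre
            simp only [pvMem, hf] at hm
            rcases p' with _ | ⟨d', p''⟩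
            · simp [pvMem] at hm
            · exact ⟨d' :: p'', by simp, hp2, hm⟩

-- a nonempty prefix of w.dropLast is a nonempty PROPER prefix of w
lemma pv_prefix_dropLast (p w : List Char) (hp : p ≠ []) :
    p <+: w.dropLast ↔ p <+: w ∧ p ≠ w := by
  rw [List.dropLast_eq_take, List.prefix_take_iff]
  constructor
  · rintro ⟨h1, h2⟩
    refine ⟨h1, fun he => ?_⟩
    subst he
    have := p.length_pos_of_ne_nil hp
    omega
  · rintro ⟨h1, h2⟩
    refine ⟨h1, ?_⟩
    have hlt : p.length < w.length := by
      rcases Nat.lt_or_ge p.length w.length with h | h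
      · exact h
      · exfalso
        apply h2
        have hpt := List.prefix_iff_eq_take.mp h1
        rwa [List.take_of_length_le h] at hpt
    omega

-- characterization of B
lemma pv_B_char (pb : List String) : solution_alt pb = false ↔ pvBad pb := by
  have hval : solution_alt pb
      = !(pb.any (fun n => pvWalk
            (pb.foldl (fun t n => pvInsert t n.toList) (.mk false .nil)) n.toList.dropLast)) := rfl
  rw [hval]
  simp only [Bool.not_eq_false', List.any_eq_true]
  constructor
  · rintro ⟨n, hn, hw⟩
    obtain ⟨p, hp, hpre, hm⟩ := (pv_walk_iff _ _).mp hw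
    rw [pv_mem_fold] at hm
    rcases hm with ⟨w, hwmem, rfl⟩ | h
    · rw [pv_prefix_dropLast _ _ hp] at hpre
      refine ⟨n, hn, w, hwmem, fun he => hpre.2 (he ▸ rfl), (pv_toList_ne_nil w).mp hp, hpre.1⟩
    · exact absurd h (by simp [pv_mem_empty])
  · rintro ⟨s, hs, t, ht, hnets, hne0, hpre⟩
    refine ⟨s, hs, (pv_walk_iff _ _).mpr ⟨t.toList, (pv_toList_ne_nil t).mpr hne0, ?_, ?_⟩⟩
    · rw [pv_prefix_dropLast _ _ ((pv_toList_ne_nil t).mpr hne0)]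
      refine ⟨hpre, fun he => hnets ?_⟩
      calc t = String.ofList t.toList := String.ofList_toList.symm
      _ = String.ofList s.toList := by rw [he]
      _ = s := String.ofList_toList
    · rw [pv_mem_fold]
      exact Or.inl ⟨t, ht, rfl⟩

-- ===== VERDICT (by name: the statement is the Claim_ definition above) =====
theorem solution_spec : Claim_equal_solution := by
  intro pb _
  unfold Spec_solution
  cases hA2 : solution pb with
  | false => exact ((pv_B_char pb).mpr ((pv_A_char pb).mp hA2)).symm
  | true =>
    cases hB2 : solution_alt pb with
    | true => rfl
    | false =>
      have hcontra := (pv_A_char pb).mpr ((pv_B_char pb).mp hB2)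
      rw [hA2] at hcontra
      exact absurd hcontra (by simp)
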